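-- pv_equiv track=rewrite | github.com/korsh624/LearnPython2025 | 5/5-297_classic.py | control_sum
-- ===== SOURCE A (Python) =====
-- def control_sum(num):
--     s = 0
--     while num:
--         s += num % 10
--         num //= 10
--         d = 2 * (num % 10)
--         d = d % 10 + d // 10
--         s += d
--         num //= 10
--     return s
-- ===== SOURCE B (Python) =====
-- def control_sum(num):
--     digits = []
--     while num:
--         digits.append(num % 10)
--         num //= 10
--     s = 0
--     double = False
--     for d in digits:
--         if double:
--             t = 2 * d
--             s += t % 10 + t // 10
--         else:
--             s += d
--         double = not double
--     return s
-- ===== Notes on version B (the rewrite author's own statement) =====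
-- stated objective: alternative
-- what changed: B first extracts all digits least-significant-first into a list, then does a single per-digit pass with a parity flag (raw on even positions, double-and-reduce on odd), instead of A's loop that consumes two digits of the number per iteration.
import Mathlib
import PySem

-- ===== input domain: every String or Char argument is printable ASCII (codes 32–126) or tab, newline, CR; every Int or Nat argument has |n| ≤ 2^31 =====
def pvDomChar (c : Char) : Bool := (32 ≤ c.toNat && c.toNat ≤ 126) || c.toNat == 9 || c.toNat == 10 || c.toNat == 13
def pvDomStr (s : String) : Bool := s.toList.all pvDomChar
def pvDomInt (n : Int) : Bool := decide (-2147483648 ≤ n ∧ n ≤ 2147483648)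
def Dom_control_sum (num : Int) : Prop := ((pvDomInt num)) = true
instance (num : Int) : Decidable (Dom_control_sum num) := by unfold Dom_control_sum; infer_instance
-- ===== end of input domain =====

-- B restructures A's two-digits-per-iteration loop into digit-list extraction plus one
-- parity-flagged pass (alternative decomposition, same cost); return values agree on num ≥ 0.

-- ===== PORT A =====
-- A's while loop; 'while num:' runs forever for num < 0 (excluded by Pre_), so the
-- recursion is guarded by 0 < num, which coincides with 'num ≠ 0' on all admitted inputs.
def csLoopA (num s : Int) : Int :=
  if _h : 0 < num then
    let s1 := s + PySem.Int.mod num 10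
    let n1 := PySem.Int.floordiv num 10
    let d  := 2 * PySem.Int.mod n1 10
    let d2 := PySem.Int.mod d 10 + PySem.Int.floordiv d 10
    csLoopA (PySem.Int.floordiv n1 10) (s1 + d2)
  else s
termination_by num.toNat
decreasing_by
  rw [PySem.Int.floordiv_eq_ediv_of_pos (by omega), PySem.Int.floordiv_eq_ediv_of_pos (by omega)]
  omega

def control_sum (num : Int) : Int := csLoopA num 0

-- ===== PORT B =====
-- B's first loop: digits least-significant-first (same guard remark as for A).
def csDigits (num : Int) : List Int :=
  if _h : 0 < num then
    PySem.Int.mod num 10 :: csDigits (PySem.Int.floordiv num 10)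
  else []
termination_by num.toNat
decreasing_by
  rw [PySem.Int.floordiv_eq_ediv_of_pos (by omega)]
  omega

def control_sum_alt (num : Int) : Int :=
  let digits := csDigits num
  (digits.foldl
    (fun (st : Int × Bool) d =>
      if st.2 then
        let t := 2 * d
        (st.1 + (PySem.Int.mod t 10 + PySem.Int.floordiv t 10), !st.2)
      else (st.1 + d, !st.2))
    (0, false)).1

-- ===== PRECONDITION & SPEC =====
-- Pre_ excludes num < 0: there Python A (and B) loop forever ('num //= 10' stabilises at -1),
-- so A returns no value.
def Pre_control_sum (num : Int) : Prop := 0 ≤ num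
instance (num : Int) : Decidable (Pre_control_sum num) := by unfold Pre_control_sum; infer_instance
def pvWitness_control_sum : Int := (8754)

def Spec_control_sum (num : Int) (out : Int) : Prop := out = control_sum_alt num
instance (num : Int) (out : Int) : Decidable (Spec_control_sum num out) := by unfold Spec_control_sum; infer_instance

-- ===== CLAIM (what is proved, stated in full; the proofs are below) =====
def Claim_equal_control_sum : Prop := ∀ (num : Int), Dom_control_sum num → Pre_control_sum num → Spec_control_sum num (control_sum num)

-- ===== LEMMAS AND PROOFS =====

-- alternating sum of a digit list: raw at parity false, double-and-reduce at parity true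
def altSum : List Int → Bool → Int
  | [], _ => 0
  | d :: rest, false => d + altSum rest true
  | d :: rest, true => (PySem.Int.mod (2 * d) 10 + PySem.Int.floordiv (2 * d) 10) + altSum rest false

theorem foldl_eq_altSum (l : List Int) (s : Int) (b : Bool) :
    (l.foldl
      (fun (st : Int × Bool) d =>
        if st.2 then
          let t := 2 * d
          (st.1 + (PySem.Int.mod t 10 + PySem.Int.floordiv t 10), !st.2)
        else (st.1 + d, !st.2))
      (s, b)).1 = s + altSum l b := by
  induction l generalizing s b with
  | nil => simp [altSum]
  | cons d rest ih =>
    cases b with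
    | false =>
      rw [List.foldl_cons]
      show (List.foldl _ (s + d, true) rest).1 = s + altSum (d :: rest) false
      rw [ih, altSum]; ring
    | true =>
      rw [List.foldl_cons]
      show (List.foldl _
        (s + (PySem.Int.mod (2 * d) 10 + PySem.Int.floordiv (2 * d) 10), false) rest).1
        = s + altSum (d :: rest) true
      rw [ih, altSum]; ring

theorem csDigits_zero_step (num : Int) (h : ¬ 0 < num) : csDigits num = [] := by
  rw [csDigits]; simp [h]

theorem csDigits_pos_step (num : Int) (h : 0 < num) :
    csDigits num = PySem.Int.mod num 10 :: csDigits (PySem.Int.floordiv num 10) := by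
  rw [csDigits]; simp [h]

theorem floordiv_ten_nonneg (num : Int) (h : 0 ≤ num) : 0 ≤ PySem.Int.floordiv num 10 := by
  rw [PySem.Int.floordiv_eq_ediv_of_pos (by omega)]; omega

theorem mod_of_nonpos_ten (num : Int) (h1 : 0 ≤ num) (h2 : ¬ 0 < num) :
    PySem.Int.mod num 10 = 0 := by
  have : num = 0 := by omega
  subst this
  rw [PySem.Int.mod_eq_emod_of_pos (by omega)]; simp

theorem loopA_eq (n : Nat) : ∀ (num s : Int), 0 ≤ num → num.toNat = n →
    csLoopA num s = s + altSum (csDigits num) false := by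
  induction n using Nat.strong_induction_on with
  | _ n ih =>
    intro num s hnn hn
    by_cases h : 0 < num
    · rw [csLoopA]; simp only [h, dite_true]
      set n1 := PySem.Int.floordiv num 10 with hn1
      have hn1nn : 0 ≤ n1 := floordiv_ten_nonneg num hnn
      set n2 := PySem.Int.floordiv n1 10 with hn2
      have hn2nn : 0 ≤ n2 := floordiv_ten_nonneg n1 hn1nn
      have hdec : n2.toNat < n := by
        subst hn
        rw [hn2, hn1, PySem.Int.floordiv_eq_ediv_of_pos (by omega),
            PySem.Int.floordiv_eq_ediv_of_pos (by omega)]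
        omega
      rw [ih n2.toNat hdec n2 _ hn2nn rfl]
      rw [csDigits_pos_step num h]
      by_cases h1 : 0 < n1
      · rw [csDigits_pos_step n1 h1, altSum, altSum]
        ring
      · have hm : PySem.Int.mod n1 10 = 0 := mod_of_nonpos_ten n1 hn1nn h1
        have hd : n2 = 0 := by
          rw [hn2, PySem.Int.floordiv_eq_ediv_of_pos (by omega)]; omega
        rw [csDigits_zero_step n1 h1, hd, csDigits_zero_step 0 (by omega)]
        simp [altSum]
        omega
    · rw [csLoopA]; simp only [h, dite_false]
      rw [csDigits_zero_step num h, altSum]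
      ring

-- ===== VERDICT (by name: the statement is the Claim_ definition above) =====
theorem control_sum_spec : Claim_equal_control_sum := by
  intro num _ hpre
  unfold Spec_control_sum control_sum control_sum_alt
  rw [loopA_eq num.toNat num 0 hpre rfl, foldl_eq_altSum]
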